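-- pv_equiv track=rewrite | github.com/Turgon37/ansible | lib/ansible/module_utils/crypto.py | cryptography_parse_key_usage_params
-- ===== SOURCE A (Python) =====
-- class OpenSSLObjectError(Exception):
--     pass
--
-- def _cryptography_get_keyusage(usage):
--     '''
--     Given a key usage identifier string, returns the parameter name used by cryptography's x509.KeyUsage().
--     Raises an OpenSSLObjectError if the identifier is unknown.
--     '''
--     if usage in ('Digital Signature', 'digitalSignature'):
--         return 'digital_signature'
--     if usage in ('Non Repudiation', 'nonRepudiation'):
--         return 'content_commitment'
--     if usage in ('Key Encipherment', 'keyEncipherment'):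
--         return 'key_encipherment'
--     if usage in ('Data Encipherment', 'dataEncipherment'):
--         return 'data_encipherment'
--     if usage in ('Key Agreement', 'keyAgreement'):
--         return 'key_agreement'
--     if usage in ('Certificate Sign', 'keyCertSign'):
--         return 'key_cert_sign'
--     if usage in ('CRL Sign', 'cRLSign'):
--         return 'crl_sign'
--     if usage in ('Encipher Only', 'encipherOnly'):
--         return 'encipher_only'
--     if usage in ('Decipher Only', 'decipherOnly'):
--         return 'decipher_only'
--     raise OpenSSLObjectError('Unknown key usage "{0}"'.format(usage))
--
-- def cryptography_parse_key_usage_params(usages):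
--     '''
--     Given a list of key usage identifier strings, returns the parameters for cryptography's x509.KeyUsage().
--     Raises an OpenSSLObjectError if an identifier is unknown.
--     '''
--     params = dict(
--         digital_signature=False,
--         content_commitment=False,
--         key_encipherment=False,
--         data_encipherment=False,
--         key_agreement=False,
--         key_cert_sign=False,
--         crl_sign=False,
--         encipher_only=False,
--         decipher_only=False,
--     )
--     for usage in usages:
--         params[_cryptography_get_keyusage(usage)] = True
--     return params
-- ===== SOURCE B (Python) =====
-- class OpenSSLObjectError(Exception):
--     pass
--
--
-- _KEYUSAGE_SPELLINGS = (
--     ('digital_signature', 'Digital Signature', 'digitalSignature'),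
--     ('content_commitment', 'Non Repudiation', 'nonRepudiation'),
--     ('key_encipherment', 'Key Encipherment', 'keyEncipherment'),
--     ('data_encipherment', 'Data Encipherment', 'dataEncipherment'),
--     ('key_agreement', 'Key Agreement', 'keyAgreement'),
--     ('key_cert_sign', 'Certificate Sign', 'keyCertSign'),
--     ('crl_sign', 'CRL Sign', 'cRLSign'),
--     ('encipher_only', 'Encipher Only', 'encipherOnly'),
--     ('decipher_only', 'Decipher Only', 'decipherOnly'),
-- )
--
--
-- def cryptography_parse_key_usage_params(usages):
--     # Validate first: reject the first unknown identifier, as A does.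
--     known = frozenset(s for _, a, b in _KEYUSAGE_SPELLINGS for s in (a, b))
--     for usage in usages:
--         if usage not in known:
--             raise OpenSSLObjectError('Unknown key usage "{0}"'.format(usage))
--     # Inverted loop: for each of the nine parameters, scan usages for either spelling.
--     return {name: (a in usages or b in usages)
--             for name, a, b in _KEYUSAGE_SPELLINGS}
-- ===== Notes on version B (the rewrite author's own statement) =====
-- stated objective: alternative
-- what changed: Inverts the loop structure: instead of pre-zeroing a dict and flipping flags while mapping each usage through a nine-branch if-chain, B validates the list against the set of accepted spellings and then builds the result by iterating over the nine parameter names, scanning usages for either spelling of each.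
import Mathlib
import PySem

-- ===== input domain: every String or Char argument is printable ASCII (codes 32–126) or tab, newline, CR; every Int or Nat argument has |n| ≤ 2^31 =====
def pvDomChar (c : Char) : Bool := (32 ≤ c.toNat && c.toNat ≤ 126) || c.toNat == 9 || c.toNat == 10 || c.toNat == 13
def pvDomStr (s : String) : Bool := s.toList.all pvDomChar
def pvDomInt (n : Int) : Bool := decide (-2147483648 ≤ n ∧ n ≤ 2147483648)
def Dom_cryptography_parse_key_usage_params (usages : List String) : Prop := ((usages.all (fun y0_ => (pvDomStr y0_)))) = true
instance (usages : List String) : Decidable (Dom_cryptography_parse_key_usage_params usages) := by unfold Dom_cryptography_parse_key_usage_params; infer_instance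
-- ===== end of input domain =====

-- B inverts the loop structure: it validates the usages against the set of accepted spellings,
-- then builds the result by iterating over the nine parameter names, scanning usages for either
-- spelling of each (alternative decomposition, same cost).

-- ===== PORT A =====
-- _cryptography_get_keyusage: chain of membership tests; none = OpenSSLObjectError (excluded by Pre_)
def pvGetKeyusage (usage : String) : Option String :=
  if usage = "Digital Signature" ∨ usage = "digitalSignature" then some "digital_signature"
  else if usage = "Non Repudiation" ∨ usage = "nonRepudiation" then some "content_commitment"
  else if usage = "Key Encipherment" ∨ usage = "keyEncipherment" then some "key_encipherment"
  else if usage = "Data Encipherment" ∨ usage = "dataEncipherment" then some "data_encipherment"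
  else if usage = "Key Agreement" ∨ usage = "keyAgreement" then some "key_agreement"
  else if usage = "Certificate Sign" ∨ usage = "keyCertSign" then some "key_cert_sign"
  else if usage = "CRL Sign" ∨ usage = "cRLSign" then some "crl_sign"
  else if usage = "Encipher Only" ∨ usage = "encipherOnly" then some "encipher_only"
  else if usage = "Decipher Only" ∨ usage = "decipherOnly" then some "decipher_only"
  else none

def cryptography_parse_key_usage_params (usages : List String) : List (String × Bool) :=
  (usages.foldl (fun d usage =>
      match pvGetKeyusage usage with
      | some k => d.insert k true
      | none => d)   -- Python raises here; Pre_ excludes it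
    (PySem.Dict.ofList
      [("digital_signature", false), ("content_commitment", false), ("key_encipherment", false),
       ("data_encipherment", false), ("key_agreement", false), ("key_cert_sign", false),
       ("crl_sign", false), ("encipher_only", false), ("decipher_only", false)])).items

-- ===== PORT B =====
-- (name, full spelling, camelCase spelling) for each of the nine KeyUsage parameters
def pvKeyusageSpellings : List (String × String × String) :=
  [("digital_signature", "Digital Signature", "digitalSignature"),
   ("content_commitment", "Non Repudiation", "nonRepudiation"),
   ("key_encipherment", "Key Encipherment", "keyEncipherment"),
   ("data_encipherment", "Data Encipherment", "dataEncipherment"),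
   ("key_agreement", "Key Agreement", "keyAgreement"),
   ("key_cert_sign", "Certificate Sign", "keyCertSign"),
   ("crl_sign", "CRL Sign", "cRLSign"),
   ("encipher_only", "Encipher Only", "encipherOnly"),
   ("decipher_only", "Decipher Only", "decipherOnly")]

-- B's validation pass either raises (excluded by Pre_) or has no effect, so only the
-- comprehension over the nine parameter names is ported.
def cryptography_parse_key_usage_params_alt (usages : List String) : List (String × Bool) :=
  pvKeyusageSpellings.map (fun t => (t.1, usages.contains t.2.1 || usages.contains t.2.2))

-- ===== PRECONDITION & SPEC =====
-- Pre_: every usage is one of the 18 accepted identifiers; otherwise A raises OpenSSLObjectError.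
def Pre_cryptography_parse_key_usage_params (usages : List String) : Prop :=
  ∀ u ∈ usages, u ∈
    ["Digital Signature", "digitalSignature", "Non Repudiation", "nonRepudiation",
     "Key Encipherment", "keyEncipherment", "Data Encipherment", "dataEncipherment",
     "Key Agreement", "keyAgreement", "Certificate Sign", "keyCertSign",
     "CRL Sign", "cRLSign", "Encipher Only", "encipherOnly",
     "Decipher Only", "decipherOnly"]
instance (usages : List String) : Decidable (Pre_cryptography_parse_key_usage_params usages) := by
  unfold Pre_cryptography_parse_key_usage_params; infer_instance

def pvWitness_cryptography_parse_key_usage_params : List String :=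
  ["digitalSignature", "CRL Sign"]

def Spec_cryptography_parse_key_usage_params (usages : List String) (out : List (String × Bool)) : Prop := out = cryptography_parse_key_usage_params_alt usages
instance (usages : List String) (out : List (String × Bool)) : Decidable (Spec_cryptography_parse_key_usage_params usages out) := by unfold Spec_cryptography_parse_key_usage_params; infer_instance

-- ===== CLAIM (what is proved, stated in full; the proofs are below) =====
def Claim_equal_cryptography_parse_key_usage_params : Prop := ∀ (usages : List String), Dom_cryptography_parse_key_usage_params usages → Pre_cryptography_parse_key_usage_params usages → Spec_cryptography_parse_key_usage_params usages (cryptography_parse_key_usage_params usages)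

-- ===== LEMMAS AND PROOFS =====

def pvAccepted : List String :=
  ["Digital Signature", "digitalSignature", "Non Repudiation", "nonRepudiation",
   "Key Encipherment", "keyEncipherment", "Data Encipherment", "dataEncipherment",
   "Key Agreement", "keyAgreement", "Certificate Sign", "keyCertSign",
   "CRL Sign", "cRLSign", "Encipher Only", "encipherOnly",
   "Decipher Only", "decipherOnly"]

def pvKeyusageParamNames : List String :=
  ["digital_signature", "content_commitment", "key_encipherment",
   "data_encipherment", "key_agreement", "key_cert_sign",
   "crl_sign", "encipher_only", "decipher_only"]

-- a dict whose items pair each parameter name with g of it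
def pvMk (g : String → Bool) : PySem.Dict String Bool :=
  PySem.Dict.mk (pvKeyusageParamNames.map (fun n => (n, g n)))

theorem pvGetKeyusage_mem (u k : String) (hk : pvGetKeyusage u = some k) :
    k ∈ pvKeyusageParamNames := by
  simp only [pvGetKeyusage] at hk
  split_ifs at hk <;> simp_all [pvKeyusageParamNames]

theorem pvMk_insert (g : String → Bool) (k : String)
    (hk : k ∈ pvKeyusageParamNames) :
    (pvMk g).insert k true = pvMk (fun n => if n = k then true else g n) := by
  have hc : (pvMk g).contains k = true := by
    rw [PySem.Dict.contains_iff_mem_keys]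
    simpa [pvMk, PySem.Dict.keys, List.map_map, Function.comp] using hk
  apply PySem.Dict.ext
  rw [PySem.Dict.items_insert, hc]
  simp only [if_true, pvMk, List.map_map]
  apply List.map_congr_left
  intro n _
  by_cases h : n = k
  · subst h; simp
  · simp [h]

theorem pvA_inv (us : List String) (g : String → Bool)
    (h : ∀ u ∈ us, (pvGetKeyusage u).isSome) :
    us.foldl (fun d usage =>
      match pvGetKeyusage usage with
      | some k => d.insert k true
      | none => d) (pvMk g)
    = pvMk (fun n => g n || us.any (fun u => pvGetKeyusage u == some n)) := by
  induction us generalizing g with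
  | nil => simp [pvMk]
  | cons u us ih =>
      obtain ⟨k, hk⟩ := Option.isSome_iff_exists.mp (h u (by simp))
      simp only [List.foldl_cons, hk]
      rw [pvMk_insert g k (pvGetKeyusage_mem u k hk),
        ih _ (fun v hv => h v (by simp [hv]))]
      simp only [pvMk, List.any_cons, hk]
      congr 1
      apply List.map_congr_left
      intro n _
      by_cases hnk : n = k
      · subst hnk; simp
      · have h' : (k == n) = false := beq_eq_false_iff_ne.mpr (fun e => hnk e.symm)
        simp [hnk, h']

theorem pvPre_isSome (usages : List String)
    (hpre : Pre_cryptography_parse_key_usage_params usages) :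
    ∀ u ∈ usages, (pvGetKeyusage u).isSome := by
  intro u hu
  have := hpre u hu
  fin_cases this <;> decide

-- the spellings of each triple map to its name, and nothing else accepted does
theorem pvSpell_fwd : ∀ t ∈ pvKeyusageSpellings,
    pvGetKeyusage t.2.1 = some t.1 ∧ pvGetKeyusage t.2.2 = some t.1 := by decide

set_option maxHeartbeats 1000000 in
theorem pvSpell_bwd : ∀ u ∈ pvAccepted, ∀ t ∈ pvKeyusageSpellings,
    pvGetKeyusage u = some t.1 → u = t.2.1 ∨ u = t.2.2 := by decide

theorem pvAny_eq (us : List String)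
    (h : ∀ u ∈ us, u ∈ pvAccepted)
    (t : String × String × String) (ht : t ∈ pvKeyusageSpellings) :
    us.any (fun u => pvGetKeyusage u == some t.1)
      = (us.contains t.2.1 || us.contains t.2.2) := by
  rw [Bool.eq_iff_iff]
  simp only [List.any_eq_true, beq_iff_eq, Bool.or_eq_true, List.contains_iff_mem]
  constructor
  · rintro ⟨u, hu, he⟩
    rcases pvSpell_bwd u (h u hu) t ht he with rfl | rfl
    · exact Or.inl hu
    · exact Or.inr hu
  · rintro (hm | hm)
    · exact ⟨t.2.1, hm, (pvSpell_fwd t ht).1⟩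
    · exact ⟨t.2.2, hm, (pvSpell_fwd t ht).2⟩

theorem pvNames_eq : pvKeyusageParamNames = pvKeyusageSpellings.map (fun t => t.1) := by decide

-- ===== VERDICT (by name: the statement is the Claim_ definition above) =====
theorem cryptography_parse_key_usage_params_spec : Claim_equal_cryptography_parse_key_usage_params := by
  intro usages _ hpre
  unfold Spec_cryptography_parse_key_usage_params
  unfold cryptography_parse_key_usage_params cryptography_parse_key_usage_params_alt
  have hsome := pvPre_isSome usages hpre
  have hinit : PySem.Dict.ofList
      [("digital_signature", false), ("content_commitment", false), ("key_encipherment", false),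
       ("data_encipherment", false), ("key_agreement", false), ("key_cert_sign", false),
       ("crl_sign", false), ("encipher_only", false), ("decipher_only", false)]
      = pvMk (fun _ => false) := by decide
  rw [hinit, pvA_inv usages _ hsome]
  simp only [pvMk, pvNames_eq, List.map_map]
  apply List.map_congr_left
  intro t ht
  simp only [Function.comp, Bool.false_or]
  rw [pvAny_eq usages hpre t ht]
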